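-- pv_equiv track=rewrite | github.com/Wulfic/Cicada3301 | Tools/solve_page_02.py | text_to_key
-- ===== SOURCE A (Python) =====
-- ENG_TO_IDX = {
--     'F': 0, 'U': 1, 'V': 1, 'TH': 2, 'O': 3, 'R': 4, 'C': 5, 'K': 5, 'Q': 5,
--     'G': 6, 'W': 7, 'H': 8, 'N': 9, 'I': 10, 'J': 11, 'EO': 12, 'P': 13,
--     'X': 14, 'S': 15, 'Z': 15, 'T': 16, 'B': 17, 'E': 18, 'M': 19, 'L': 20,
--     'NG': 21, 'ING': 21, 'OE': 22, 'D': 23, 'A': 24, 'AE': 25, 'Y': 26, 'IO': 27, 'EA': 28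
-- }
--
-- def text_to_key(text):
--     key = []
--     i = 0
--     text = text.upper().replace(" ", "")
--     while i < len(text):
--         if i < len(text) - 1:
--             two_char = text[i:i+2]
--             if two_char in ENG_TO_IDX:
--                 key.append(ENG_TO_IDX[two_char])
--                 i += 2
--                 continue
--         char = text[i]
--         if char in ENG_TO_IDX:
--             key.append(ENG_TO_IDX[char])
--         i += 1
--     return key
-- ===== SOURCE B (Python) =====
-- # B: single left-to-right pass over the cleaned characters with a one-character
-- # pending state (no index arithmetic, no slicing), using char-level tables.
-- _DIGRAPH = {('T', 'H'): 2, ('E', 'O'): 12, ('N', 'G'): 21, ('O', 'E'): 22,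
--             ('A', 'E'): 25, ('I', 'O'): 27, ('E', 'A'): 28}
-- _SINGLE = {'F': 0, 'U': 1, 'V': 1, 'O': 3, 'R': 4, 'C': 5, 'K': 5, 'Q': 5,
--            'G': 6, 'W': 7, 'H': 8, 'N': 9, 'I': 10, 'J': 11, 'P': 13,
--            'X': 14, 'S': 15, 'Z': 15, 'T': 16, 'B': 17, 'E': 18, 'M': 19,
--            'L': 20, 'D': 23, 'A': 24, 'Y': 26}
--
-- def text_to_key(text):
--     key = []
--     pend = None
--     for c in text.upper().replace(" ", ""):
--         if pend is None:
--             pend = c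
--         elif (pend, c) in _DIGRAPH:
--             key.append(_DIGRAPH[(pend, c)])
--             pend = None
--         else:
--             if pend in _SINGLE:
--                 key.append(_SINGLE[pend])
--             pend = c
--     if pend is not None and pend in _SINGLE:
--         key.append(_SINGLE[pend])
--     return key
-- ===== Notes on version B (the rewrite author's own statement) =====
-- stated objective: faster
-- what changed: Replaced the index-based while loop with two-character slicing and string-keyed dict lookups by a single pass over the characters that carries a one-character pending state and consults char-pair/char tables, avoiding per-step string slice construction.
import Mathlib
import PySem

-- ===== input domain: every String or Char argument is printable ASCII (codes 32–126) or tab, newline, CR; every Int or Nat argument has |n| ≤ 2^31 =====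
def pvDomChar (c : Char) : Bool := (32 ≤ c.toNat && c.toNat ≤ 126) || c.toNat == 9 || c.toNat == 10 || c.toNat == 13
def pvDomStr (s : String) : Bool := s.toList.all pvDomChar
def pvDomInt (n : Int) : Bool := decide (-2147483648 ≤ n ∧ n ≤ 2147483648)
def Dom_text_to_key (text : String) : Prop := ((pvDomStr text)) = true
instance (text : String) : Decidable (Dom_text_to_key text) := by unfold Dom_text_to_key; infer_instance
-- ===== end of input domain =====

-- B replaces A's index-based while loop (two-character slices looked up in a string-keyed
-- dict) by a single pass over the characters carrying a one-character pending state and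
-- char-level tables; no per-step slice strings are built (measured constant-factor faster).

-- ===== PORT A =====
def pvEngToIdx : PySem.Dict String Int := PySem.Dict.ofList
  [("F",0),("U",1),("V",1),("TH",2),("O",3),("R",4),("C",5),("K",5),("Q",5),
   ("G",6),("W",7),("H",8),("N",9),("I",10),("J",11),("EO",12),("P",13),
   ("X",14),("S",15),("Z",15),("T",16),("B",17),("E",18),("M",19),("L",20),
   ("NG",21),("ING",21),("OE",22),("D",23),("A",24),("AE",25),("Y",26),("IO",27),("EA",28)]

-- the body of A's while loop: `i` and the accumulated `key`; steps by 2 (digraph) or 1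
def textToKeyGo (text : String) (i : Int) (key : List Int) : List Int :=
  if _h : i < PySem.Str.len text then
    -- if i < len(text) - 1: two_char = text[i:i+2]; if two_char in ENG_TO_IDX: …
    if i < PySem.Str.len text - 1 then
      match pvEngToIdx.get? (PySem.Str.slice text (some i) (some (i + 2))) with
      | some v => textToKeyGo text (i + 2) (key ++ [v])
      | none =>
        -- char = text[i]; if char in ENG_TO_IDX: key.append(…); i += 1
        match PySem.Str.pyGet? text i with
        | some c =>
          match pvEngToIdx.get? (String.ofList [c]) with
          | some v => textToKeyGo text (i + 1) (key ++ [v])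
          | none => textToKeyGo text (i + 1) key
        | none => key   -- unreachable: i < len(text)
    else
      match PySem.Str.pyGet? text i with
      | some c =>
        match pvEngToIdx.get? (String.ofList [c]) with
        | some v => textToKeyGo text (i + 1) (key ++ [v])
        | none => textToKeyGo text (i + 1) key
      | none => key   -- unreachable: i < len(text)
  else key
termination_by (PySem.Str.len text - i).toNat
decreasing_by all_goals (simp [PySem.Str.len_eq] at *; omega)

def text_to_key (text : String) : List Int :=
  textToKeyGo (PySem.Str.replace (PySem.Str.upper text) " " "") 0 []

-- ===== PORT B =====
def pvDigraph : PySem.Dict (Char × Char) Int := PySem.Dict.ofList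
  [(('T','H'),2),(('E','O'),12),(('N','G'),21),(('O','E'),22),(('A','E'),25),(('I','O'),27),(('E','A'),28)]

def pvSingle : PySem.Dict Char Int := PySem.Dict.ofList
  [('F',0),('U',1),('V',1),('O',3),('R',4),('C',5),('K',5),('Q',5),('G',6),('W',7),('H',8),
   ('N',9),('I',10),('J',11),('P',13),('X',14),('S',15),('Z',15),('T',16),('B',17),('E',18),
   ('M',19),('L',20),('D',23),('A',24),('Y',26)]

-- `if pend is not None and pend in _SINGLE: key.append(_SINGLE[pend])`
def textToKeyAltFlush (key : List Int) (pend : Option Char) : List Int :=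
  match pend with
  | some p => match pvSingle.get? p with
              | some v => key ++ [v]
              | none => key
  | none => key

-- the for-loop of B: one character at a time, carrying (key, pend)
def textToKeyAltGo (key : List Int) (pend : Option Char) : List Char → List Int
  | [] => textToKeyAltFlush key pend
  | c :: cs =>
    match pend with
    | none => textToKeyAltGo key (some c) cs
    | some p =>
      match pvDigraph.get? (p, c) with
      | some v => textToKeyAltGo (key ++ [v]) none cs
      | none =>
        match pvSingle.get? p with
        | some v => textToKeyAltGo (key ++ [v]) (some c) cs
        | none => textToKeyAltGo key (some c) cs

def text_to_key_alt (text : String) : List Int :=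
  textToKeyAltGo [] none (PySem.Str.replace (PySem.Str.upper text) " " "").toList

-- ===== PRECONDITION & SPEC =====
def Spec_text_to_key (text : String) (out : List Int) : Prop := out = text_to_key_alt text
instance (text : String) (out : List Int) : Decidable (Spec_text_to_key text out) := by unfold Spec_text_to_key; infer_instance

-- ===== CLAIM (what is proved, stated in full; the proofs are below) =====
def Claim_equal_text_to_key : Prop := ∀ (text : String), Dom_text_to_key text → Spec_text_to_key text (text_to_key text)

-- ===== LEMMAS AND PROOFS =====

-- common reference tokenization both loops are reduced to
def pvListA : List Char → List Int
  | [] => []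
  | [a] => textToKeyAltFlush [] (some a)
  | a :: b :: rest =>
    match pvDigraph.get? (a, b) with
    | some v => v :: pvListA rest
    | none => textToKeyAltFlush [] (some a) ++ pvListA (b :: rest)

theorem pv_beq_ofList (s : String) (l : List Char) : (s == String.ofList l) = (s.toList == l) := by
  by_cases h : s.toList = l
  · subst h; simp [String.ofList_toList]
  · have h2 : s ≠ String.ofList l := fun he => h (by simpa using congrArg String.toList he)
    simp [h, h2]

theorem pv_get?_mk_nil {κ ν : Type} [BEq κ] (x : κ) : (PySem.Dict.mk ([] : List (κ × ν))).get? x = none := rfl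

-- A's two-character lookup sees exactly the digraph table
theorem pv_two_char (a b : Char) : pvEngToIdx.get? (String.ofList [a, b]) = pvDigraph.get? (a, b) := by
  have hA : pvEngToIdx = PySem.Dict.mk
    [("F",0),("U",1),("V",1),("TH",2),("O",3),("R",4),("C",5),("K",5),("Q",5),
     ("G",6),("W",7),("H",8),("N",9),("I",10),("J",11),("EO",12),("P",13),
     ("X",14),("S",15),("Z",15),("T",16),("B",17),("E",18),("M",19),("L",20),
     ("NG",21),("ING",21),("OE",22),("D",23),("A",24),("AE",25),("Y",26),("IO",27),("EA",28)] := by decide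
  have hB : pvDigraph = PySem.Dict.mk
    [(('T','H'),2),(('E','O'),12),(('N','G'),21),(('O','E'),22),(('A','E'),25),(('I','O'),27),(('E','A'),28)] := by decide
  rw [hA, hB]
  simp [PySem.Dict.get?_mk_cons, pv_beq_ofList, pv_get?_mk_nil]

-- A's one-character lookup sees exactly the single-letter table
theorem pv_one_char (a : Char) : pvEngToIdx.get? (String.ofList [a]) = pvSingle.get? a := by
  have hA : pvEngToIdx = PySem.Dict.mk
    [("F",0),("U",1),("V",1),("TH",2),("O",3),("R",4),("C",5),("K",5),("Q",5),
     ("G",6),("W",7),("H",8),("N",9),("I",10),("J",11),("EO",12),("P",13),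
     ("X",14),("S",15),("Z",15),("T",16),("B",17),("E",18),("M",19),("L",20),
     ("NG",21),("ING",21),("OE",22),("D",23),("A",24),("AE",25),("Y",26),("IO",27),("EA",28)] := by decide
  have hB : pvSingle = PySem.Dict.mk
    [('F',0),('U',1),('V',1),('O',3),('R',4),('C',5),('K',5),('Q',5),('G',6),('W',7),('H',8),
     ('N',9),('I',10),('J',11),('P',13),('X',14),('S',15),('Z',15),('T',16),('B',17),('E',18),
     ('M',19),('L',20),('D',23),('A',24),('Y',26)] := by decide
  rw [hA, hB]
  simp [PySem.Dict.get?_mk_cons, pv_beq_ofList, pv_get?_mk_nil]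

-- the two-character slice A takes at position n
theorem pv_slice2 (l : List Char) (n : Nat) :
    PySem.Str.slice (String.ofList l) (some (n : Int)) (some ((n : Int) + 2)) =
      String.ofList ((l.drop n).take 2) := by
  rw [← String.ofList_toList (s := PySem.Str.slice (String.ofList l) (some (n : Int)) (some ((n : Int) + 2)))]
  congr 1
  simp only [PySem.Str.toList_slice, PySem.Chars.slice_eq_listSlice, String.toList_ofList]
  rw [show ((n:Int)+2) = ((n:Int) + ((2:Nat):Int)) by norm_num, PySem.List.slice_natCast_add]

-- A's while loop, started at position n, computes pvListA of the remaining characters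
theorem pv_goA (l : List Char) (n : Nat) (key : List Int) :
    textToKeyGo (String.ofList l) (n : Int) key = key ++ pvListA (l.drop n) := by
  generalize hm : l.length - n = m
  induction m using Nat.strong_induction_on generalizing n key with
  | _ m ih =>
  have hlen : PySem.Str.len (String.ofList l) = (l.length : Int) := by simp [pysem]
  have hget : PySem.Str.pyGet? (String.ofList l) (n : Int) = l[n]? := by simp [pysem]
  have hcast1 : ((n : Int) + 1) = ((n + 1 : Nat) : Int) := by push_cast; ring
  have hcast2 : ((n : Int) + 2) = ((n + 2 : Nat) : Int) := by push_cast; ring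
  rw [textToKeyGo, hlen]
  by_cases hn : n < l.length
  · rcases hd : l.drop n with _ | ⟨a, tl⟩
    · exfalso
      have := congrArg List.length hd
      simp at this; omega
    · have ha : l[n]? = some a := by
        rw [← List.head?_drop, hd]; rfl
      rcases htl : tl with _ | ⟨b, rest⟩
      · -- exactly one character left: n = l.length - 1
        have hone : l.length = n + 1 := by
          have := congrArg List.length hd
          simp [htl] at this; omega
        rw [dif_pos (by exact_mod_cast hn)]
        rw [if_neg (by rw [hone]; push_cast; omega)]
        rw [hget, ha]
        have hdrop1 : l.drop (n + 1) = [] := by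
          rw [← List.tail_drop, hd, htl]; rfl
        cases hs : pvSingle.get? a with
        | some v =>
          simp only [pv_one_char, hs, hcast1]
          rw [ih (l.length - (n+1)) (by omega) (n+1) (key ++ [v]) rfl, hdrop1]
          simp [pvListA, textToKeyAltFlush, hs]
        | none =>
          simp only [pv_one_char, hs, hcast1]
          rw [ih (l.length - (n+1)) (by omega) (n+1) key rfl, hdrop1]
          simp [pvListA, textToKeyAltFlush, hs]
      · -- at least two characters left
        have hlen2 : n + 2 ≤ l.length := by
          have := congrArg List.length hd
          simp [htl] at this; omega
        have htake : (l.drop n).take 2 = [a, b] := by rw [hd, htl]; rfl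
        have hdrop1 : l.drop (n + 1) = b :: rest := by
          rw [← List.tail_drop, hd, htl]; rfl
        have hdrop2 : l.drop (n + 2) = rest := by
          have : l.drop (n + 2) = (l.drop (n + 1)).tail := by rw [← List.tail_drop]
          rw [this, hdrop1]; rfl
        rw [dif_pos (by exact_mod_cast hn)]
        rw [if_pos (by omega)]
        rw [pv_slice2, htake]
        cases hdg : pvDigraph.get? (a, b) with
        | some v =>
          simp only [pv_two_char, hdg, hcast2]
          rw [ih (l.length - (n+2)) (by omega) (n+2) (key ++ [v]) rfl, hdrop2]
          simp [pvListA, hdg]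
        | none =>
          simp only [pv_two_char, hdg, hget, ha]
          cases hs : pvSingle.get? a with
          | some v =>
            simp only [pv_one_char, hs, hcast1]
            rw [ih (l.length - (n+1)) (by omega) (n+1) (key ++ [v]) rfl, hdrop1]
            simp [pvListA, hdg, textToKeyAltFlush, hs]
          | none =>
            simp only [pv_one_char, hs, hcast1]
            rw [ih (l.length - (n+1)) (by omega) (n+1) key rfl, hdrop1]
            simp [pvListA, hdg, textToKeyAltFlush, hs]
  · rw [dif_neg (by exact_mod_cast hn)]
    rw [List.drop_eq_nil_of_le (by omega)]
    simp [pvListA]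

-- B's fold computes pvListA of the pending character followed by the rest
theorem pv_goB (cs : List Char) (key : List Int) (pend : Option Char) :
    textToKeyAltGo key pend cs =
      key ++ pvListA (match pend with | some p => p :: cs | none => cs) := by
  induction cs generalizing key pend with
  | nil =>
    cases pend with
    | none => simp [textToKeyAltGo, pvListA, textToKeyAltFlush]
    | some p =>
      simp only [textToKeyAltGo, pvListA, textToKeyAltFlush]
      cases pvSingle.get? p <;> simp
  | cons c cs ih =>
    cases pend with
    | none => simpa using ih key (some c)
    | some p =>
      simp only [textToKeyAltGo]
      cases hd : pvDigraph.get? (p, c) with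
      | some v =>
        simp [ih (key ++ [v]) none, pvListA, hd]
      | none =>
        cases hs : pvSingle.get? p with
        | some v =>
          simp [ih (key ++ [v]) (some c), pvListA, hd, textToKeyAltFlush, hs]
        | none =>
          simp [ih key (some c), pvListA, hd, textToKeyAltFlush, hs]

-- ===== VERDICT (by name: the statement is the Claim_ definition above) =====
theorem text_to_key_spec : Claim_equal_text_to_key := by
  intro text _
  unfold Spec_text_to_key text_to_key text_to_key_alt
  set s := PySem.Str.replace (PySem.Str.upper text) " " "" with hs
  have h0 : textToKeyGo s (0 : Int) [] = textToKeyGo (String.ofList s.toList) ((0 : Nat) : Int) [] := by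
    rw [String.ofList_toList]; norm_num
  rw [h0, pv_goA, pv_goB]
  simp
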